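-- pv_equiv track=rewrite | github.com/Yacine84/expatscore-web | fix_slugs.py | detect_broken_slug
-- ===== SOURCE A (Python) =====
-- BROKEN_SLUG_TOKENS = {
--     # 'für' stripped → 'fr'
--     'fr':         'fuer',
--
--     # 'für' variants embedded with following word (dash → glued)
--     # These arise when the slugger removed the umlaut AND the dash
--     # e.g. 'einlösen-für-ice' → 'einlsen-fr-ice' still has dashes,
--     # so individual tokens handle it. But 'einlösen' → 'einlsen'
--     # is a single corrupted token:
--     'einlsen':    'einloesen',     # einlösen
--     'einlsung':   'einloesung',
--     'einlsungen': 'einloesungen',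
--
--     # Other umlaut-stripped German tokens commonly appearing in expat slugs
--     'brgeramt':   'buergeramt',    # Bürgeramt
--     'brger':      'buerger',
--     'bros':       'bueros',
--     'grn':        'gruen',
--     'knnen':      'koennen',
--     'mglich':     'moeglich',
--     'mssen':      'muessen',
--     'berweisung': 'ueberweisung',
--     'gltig':      'gueltig',
--     'tglich':     'taeglich',
--     'whrend':     'waehrend',
--     'whrung':     'waehrung',
--     'hnlich':     'aehnlich',
--     'knnte':      'koennte',
--     'trglich':    'traeglich',
-- }
--
-- def detect_broken_slug(slug: str) -> str | None:
--     """
--     Return repaired slug if any token (between dashes) matches a broken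
--     pattern, else None. Word-boundary safe — won't touch 'free' or 'fresh'.
--     """
--     tokens = slug.split('-')
--     changed = False
--     for i, tok in enumerate(tokens):
--         if tok in BROKEN_SLUG_TOKENS:
--             tokens[i] = BROKEN_SLUG_TOKENS[tok]
--             changed = True
--     if changed:
--         return '-'.join(tokens)
--     return None
-- ===== SOURCE B (Python) =====
-- BROKEN_SLUG_TOKENS = {
--     'fr':         'fuer',
--     'einlsen':    'einloesen',
--     'einlsung':   'einloesung',
--     'einlsungen': 'einloesungen',
--     'brgeramt':   'buergeramt',
--     'brger':      'buerger',
--     'bros':       'bueros',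
--     'grn':        'gruen',
--     'knnen':      'koennen',
--     'mglich':     'moeglich',
--     'mssen':      'muessen',
--     'berweisung': 'ueberweisung',
--     'gltig':      'gueltig',
--     'tglich':     'taeglich',
--     'whrend':     'waehrend',
--     'whrung':     'waehrung',
--     'hnlich':     'aehnlich',
--     'knnte':      'koennte',
--     'trglich':    'traeglich',
-- }
--
--
-- def detect_broken_slug(slug: str) -> str | None:
--     """Single character-level pass: accumulate the current token, flush it
--     (repaired if broken) at every dash, using a trailing sentinel dash."""
--     out = []
--     cur = ""
--     changed = False
--     for ch in slug + '-':
--         if ch == '-':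
--             rep = BROKEN_SLUG_TOKENS.get(cur)
--             if rep is not None:
--                 out.append(rep)
--                 changed = True
--             else:
--                 out.append(cur)
--             cur = ""
--         else:
--             cur = cur + ch
--     if changed:
--         return '-'.join(out)
--     return None
-- ===== Notes on version B (the rewrite author's own statement) =====
-- stated objective: alternative
-- what changed: Replaces the split/enumerate/mutate/join passes by a single character-level scan of the slug with a sentinel dash appended, accumulating the current token and flushing it (repaired via the dict) at each separator while maintaining the output token list and changed flag in one pass.
import Mathlib
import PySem

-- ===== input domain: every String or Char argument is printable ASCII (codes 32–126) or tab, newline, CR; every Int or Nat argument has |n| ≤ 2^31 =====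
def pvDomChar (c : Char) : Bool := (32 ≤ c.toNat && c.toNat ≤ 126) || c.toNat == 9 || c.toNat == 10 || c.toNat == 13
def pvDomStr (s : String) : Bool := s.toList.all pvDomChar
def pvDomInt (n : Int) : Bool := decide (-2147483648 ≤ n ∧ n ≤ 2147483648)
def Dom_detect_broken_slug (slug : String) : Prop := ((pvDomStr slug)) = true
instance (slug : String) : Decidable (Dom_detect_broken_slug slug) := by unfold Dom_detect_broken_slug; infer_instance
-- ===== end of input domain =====

-- B replaces A's split/enumerate/mutate/join passes by one character-level scan
-- that flushes (and repairs) the current token at every dash (objective: alternative).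

-- the module-level BROKEN_SLUG_TOKENS dict, shared verbatim by both programs
def brokenSlugTokens : PySem.Dict String String := PySem.Dict.ofList [
  ("fr", "fuer"),
  ("einlsen", "einloesen"),
  ("einlsung", "einloesung"),
  ("einlsungen", "einloesungen"),
  ("brgeramt", "buergeramt"),
  ("brger", "buerger"),
  ("bros", "bueros"),
  ("grn", "gruen"),
  ("knnen", "koennen"),
  ("mglich", "moeglich"),
  ("mssen", "muessen"),
  ("berweisung", "ueberweisung"),
  ("gltig", "gueltig"),
  ("tglich", "taeglich"),
  ("whrend", "waehrend"),
  ("whrung", "waehrung"),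
  ("hnlich", "aehnlich"),
  ("knnte", "koennte"),
  ("trglich", "traeglich")]

-- ===== PORT A =====
-- slug.split('-') on the char level (sep is nonempty, so split never raises);
-- the for-loop over enumerate(tokens) with in-place assignment is a foldl carrying
-- (tokens, changed) and setting index i (enumerate reads each element before it is replaced).
def detect_broken_slug (slug : String) : Option String :=
  let tokens : List String := (PySem.Chars.splitOn slug.toList ['-']).map String.ofList
  let st := (PySem.List.enumerate tokens).foldl
    (fun (st : List String × Bool) p =>
      match brokenSlugTokens.get? p.2 with
      | some v => (st.1.set p.1.toNat v, true)
      | none => st)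
    (tokens, false)
  if st.2 then some (PySem.Str.join "-" st.1) else none

-- ===== PORT B =====
-- Source B: one pass over slug + '-'; state (out, cur, changed); at each dash the
-- current token is flushed, repaired via the dict when it matches.
def detect_broken_slug_alt (slug : String) : Option String :=
  let st := (slug.toList ++ ['-']).foldl
    (fun (st : List String × List Char × Bool) ch =>
      if ch = '-' then
        match brokenSlugTokens.get? (String.ofList st.2.1) with
        | some rep => (st.1 ++ [rep], [], true)
        | none => (st.1 ++ [String.ofList st.2.1], [], st.2.2)
      else (st.1, st.2.1 ++ [ch], st.2.2))
    ([], [], false)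
  if st.2.2 then some (PySem.Str.join "-" st.1) else none

-- ===== PRECONDITION & SPEC =====
def Spec_detect_broken_slug (slug : String) (out : Option String) : Prop := out = detect_broken_slug_alt slug
instance (slug : String) (out : Option String) : Decidable (Spec_detect_broken_slug slug out) := by unfold Spec_detect_broken_slug; infer_instance

-- ===== CLAIM (what is proved, stated in full; the proofs are below) =====
def Claim_equal_detect_broken_slug : Prop := ∀ (slug : String), Dom_detect_broken_slug slug → Spec_detect_broken_slug slug (detect_broken_slug slug)

-- ===== LEMMAS AND PROOFS =====

-- reference splitter: split a char list at dashes (always nonempty)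
def splitDash : List Char → List (List Char)
  | [] => [[]]
  | c :: rest =>
    if c = '-' then [] :: splitDash rest
    else
      match splitDash rest with
      | [] => [[c]]
      | t :: ts => (c :: t) :: ts

-- prepend a partial token onto the head piece
def headCat (p : List Char) : List (List Char) → List (List Char)
  | [] => [p]
  | t :: ts => (p ++ t) :: ts

theorem splitDash_ne_nil (l : List Char) : splitDash l ≠ [] := by
  cases l with
  | nil => simp [splitDash]
  | cons c rest =>
    simp only [splitDash]
    split_ifs
    · simp
    · cases h : splitDash rest <;> simp

theorem splitOn_go_eq (l : List Char) : ∀ (fuel : Nat) (cur : List Char) (acc : List (List Char)),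
    l.length < fuel →
    PySem.Chars.splitOn.go ['-'] fuel l cur acc = acc.reverse ++ headCat cur.reverse (splitDash l) := by
  induction l with
  | nil =>
    intro fuel cur acc h
    cases fuel with
    | zero => omega
    | succ f => simp [PySem.Chars.splitOn.go, splitDash, headCat]
  | cons c rest ih =>
    intro fuel cur acc h
    cases fuel with
    | zero => omega
    | succ f =>
      by_cases hc : c = '-'
      · subst hc
        rw [show PySem.Chars.splitOn.go ['-'] (f+1) ('-' :: rest) cur acc
              = PySem.Chars.splitOn.go ['-'] f rest [] (cur.reverse :: acc) by
            simp [PySem.Chars.splitOn.go, List.isPrefixOf]]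
        rw [ih f [] (cur.reverse :: acc) (by simpa using h)]
        cases hs : splitDash rest with
        | nil => exact absurd hs (splitDash_ne_nil rest)
        | cons t ts => simp [splitDash, hs, headCat]
      · rw [show PySem.Chars.splitOn.go ['-'] (f+1) (c :: rest) cur acc
              = PySem.Chars.splitOn.go ['-'] f rest (c :: cur) acc by
            have hc' : ¬('-' = c) := fun e => hc e.symm
            simp [PySem.Chars.splitOn.go, List.isPrefixOf, hc']]
        rw [ih f (c :: cur) acc (by simpa using h)]
        cases hs : splitDash rest with
        | nil => exact absurd hs (splitDash_ne_nil rest)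
        | cons t ts => simp [splitDash, hs, hc, headCat]

theorem splitOn_eq_splitDash (cs : List Char) :
    PySem.Chars.splitOn cs ['-'] = splitDash cs := by
  rw [PySem.Chars.splitOn, splitOn_go_eq cs (cs.length + 1) [] [] (by omega)]
  cases hs : splitDash cs with
  | nil => exact absurd hs (splitDash_ne_nil cs)
  | cons t ts => simp [headCat]

-- the per-token repair and the "some token is broken" test
def repairTok (t : String) : String :=
  match brokenSlugTokens.get? t with
  | some v => v
  | none => t

def isBroken (t : String) : Bool := (brokenSlugTokens.get? t).isSome

-- B's fold over cs ++ ['-'] flushes every piece of splitDash cs, repaired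
theorem alt_fold_eq (cs : List Char) :
    ∀ (out : List String) (cur : List Char) (ch : Bool),
    (cs ++ ['-']).foldl
      (fun (st : List String × List Char × Bool) c =>
        if c = '-' then
          match brokenSlugTokens.get? (String.ofList st.2.1) with
          | some rep => (st.1 ++ [rep], [], true)
          | none => (st.1 ++ [String.ofList st.2.1], [], st.2.2)
        else (st.1, st.2.1 ++ [c], st.2.2))
      (out, cur, ch)
    = (out ++ (headCat cur (splitDash cs)).map (fun t => repairTok (String.ofList t)),
       [],
       ch || (headCat cur (splitDash cs)).any (fun t => isBroken (String.ofList t))) := by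
  induction cs with
  | nil =>
    intro out cur ch
    simp only [List.nil_append, List.foldl_cons, List.foldl_nil, headCat,
      List.map, List.any_cons, List.any_nil, splitDash]
    unfold repairTok isBroken
    cases h : brokenSlugTokens.get? (String.ofList cur) <;> simp [h]
  | cons c rest ih =>
    intro out cur ch
    by_cases hc : c = '-'
    · subst hc
      cases h : brokenSlugTokens.get? (String.ofList cur) with
      | some rep =>
        simp only [List.cons_append, List.foldl_cons, if_true, h]
        rw [ih (out ++ [rep]) [] true]
        cases hs : splitDash rest with
        | nil => exact absurd hs (splitDash_ne_nil rest)
        | cons t ts =>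
          simp [splitDash, hs, headCat, repairTok, isBroken, h]
      | none =>
        simp only [List.cons_append, List.foldl_cons, if_true, h]
        rw [ih (out ++ [String.ofList cur]) [] ch]
        cases hs : splitDash rest with
        | nil => exact absurd hs (splitDash_ne_nil rest)
        | cons t ts =>
          simp [splitDash, hs, headCat, repairTok, isBroken, h]
    · simp only [List.cons_append, List.foldl_cons, if_neg hc]
      rw [ih out (cur ++ [c]) ch]
      cases hs : splitDash rest with
      | nil => exact absurd hs (splitDash_ne_nil rest)
      | cons t ts => simp [splitDash, hs, hc, headCat]

-- setting the element just past a prefix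
theorem set_at_prefix (pre : List String) (x v : String) (xs : List String) :
    (pre ++ x :: xs).set pre.length v = pre ++ v :: xs := by
  induction pre with
  | nil => simp
  | cons p ps ih => simp [ih]

-- A's enumerate fold maps repairTok over the tokens and ORs the broken flags
theorem a_fold_eq (xs : List String) :
    ∀ (pre : List String) (ch : Bool),
    (PySem.List.enumerate xs (pre.length : Int)).foldl
      (fun (st : List String × Bool) p =>
        match brokenSlugTokens.get? p.2 with
        | some v => (st.1.set p.1.toNat v, true)
        | none => st)
      (pre ++ xs, ch)
    = (pre ++ xs.map repairTok, ch || xs.any isBroken) := by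
  induction xs with
  | nil => intro pre ch; simp [PySem.List.enumerate_nil]
  | cons x rest ih =>
    intro pre ch
    rw [PySem.List.enumerate_cons]
    simp only [List.foldl_cons]
    cases h : brokenSlugTokens.get? x with
    | some v =>
      have hset : (pre ++ x :: rest).set ((pre.length : Int)).toNat v = (pre ++ [v]) ++ rest := by
        rw [Int.toNat_natCast, set_at_prefix]; simp
      have hlen : ((pre.length : Int)) + 1 = (((pre ++ [v]).length : Nat) : Int) := by simp
      simp only [hset]
      rw [hlen, ih (pre ++ [v]) true]
      simp [repairTok, isBroken, h]
    | none =>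
      have hres : pre ++ x :: rest = (pre ++ [x]) ++ rest := by simp
      have hlen : ((pre.length : Int)) + 1 = (((pre ++ [x]).length : Nat) : Int) := by simp
      simp only [hres]
      rw [hlen, ih (pre ++ [x]) ch]
      simp [repairTok, isBroken, h]

theorem map_repair_comm (ts : List (List Char)) :
    ts.map (fun t => repairTok (String.ofList t)) = (ts.map String.ofList).map repairTok := by
  simp [List.map_map]

theorem any_broken_comm (ts : List (List Char)) :
    ts.any (fun t => isBroken (String.ofList t)) = (ts.map String.ofList).any isBroken := by
  simp [List.any_map]
  rfl

-- ===== VERDICT (by name: the statement is the Claim_ definition above) =====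
theorem detect_broken_slug_spec : Claim_equal_detect_broken_slug := by
  intro slug _
  unfold Spec_detect_broken_slug detect_broken_slug detect_broken_slug_alt
  simp only []
  rw [alt_fold_eq slug.toList [] [] false]
  have h0 : headCat [] (splitDash slug.toList) = splitDash slug.toList := by
    cases hs : splitDash slug.toList with
    | nil => exact absurd hs (splitDash_ne_nil slug.toList)
    | cons t ts => simp [headCat]
  rw [h0]
  have ha := a_fold_eq ((PySem.Chars.splitOn slug.toList ['-']).map String.ofList) [] false
  simp only [List.length_nil, Nat.cast_zero, List.nil_append] at ha
  rw [ha, splitOn_eq_splitDash, map_repair_comm, any_broken_comm]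
  simp
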